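-- pv_equiv track=rewrite | github.com/piotrhelm/NESTFUL | data_v2/executable_functions/py_code_file_1223.py | create_unique_item_dictionary
-- ===== SOURCE A (Python) =====
-- from typing import List, Dict
--
-- def create_unique_item_dictionary(items1: List[str], items2: List[str]) -> Dict[str, List[str]]:
--
--     """Creates a dictionary of unique items from two lists.
--
--     The keys of the dictionary are the values from the first list,
--
--     and the value for each key is a list of items from the second list
--
--     that are different from the corresponding key.
--
--     Args:
--
--         items1: The first list of items.
--
--         items2: The second list of items.
--
--     """
--
--     unique_items = {}
--
--     for index, item in enumerate(items1):
--
--         second_item = items2[index]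
--
--         if item not in unique_items:
--
--             unique_items[item] = [second_item]
--
--         else:
--
--             if second_item not in unique_items[item]:
--
--                 unique_items[item].append(second_item)
--
--     return unique_items
-- ===== SOURCE B (Python) =====
-- def create_unique_item_dictionary(items1, items2):
--     grouped = {}
--     for i in range(len(items1)):
--         grouped.setdefault(items1[i], []).append(items2[i])
--     return {key: list(dict.fromkeys(values)) for key, values in grouped.items()}
-- ===== Notes on version B (the rewrite author's own statement) =====
-- stated objective: alternative
-- what changed: B first collects ALL corresponding second values per key into a multimap (setdefault+append, no membership test in the loop), then a second pass collapses each value list with dict.fromkeys to its distinct elements in first-seen order, instead of A's inline not-in guard maintained during the single pass.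
import Mathlib
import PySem

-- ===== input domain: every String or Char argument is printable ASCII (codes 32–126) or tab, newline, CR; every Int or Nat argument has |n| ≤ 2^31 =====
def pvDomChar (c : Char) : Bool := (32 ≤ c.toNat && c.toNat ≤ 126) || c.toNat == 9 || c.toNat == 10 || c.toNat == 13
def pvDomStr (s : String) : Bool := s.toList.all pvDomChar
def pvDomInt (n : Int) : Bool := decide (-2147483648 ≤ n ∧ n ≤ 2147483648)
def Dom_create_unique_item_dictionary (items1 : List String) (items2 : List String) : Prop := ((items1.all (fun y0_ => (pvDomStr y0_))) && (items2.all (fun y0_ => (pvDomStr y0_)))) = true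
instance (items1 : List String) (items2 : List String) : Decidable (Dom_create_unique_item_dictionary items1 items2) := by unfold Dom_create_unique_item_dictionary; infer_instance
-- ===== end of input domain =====

-- ===== PORT A =====
-- B restructures A: collect-all multimap first, then a dedup pass (objective: alternative decomposition, same cost).
def create_unique_item_dictionary (items1 : List String) (items2 : List String) : List (String × List String) :=
  (List.foldl
    (fun (d : PySem.Dict String (List String)) (p : Int × String) =>
      -- second_item = items2[index]; under Pre_ the index is always in range, so the "" default is never used
      let second := (PySem.List.pyGet? items2 p.1).getD ""
      if d.contains p.2 = false then
        d.insert p.2 [second]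
      else if second ∈ d.getD p.2 [] then d
      else d.modify p.2 [] (fun l => l ++ [second]))
    PySem.Dict.empty (PySem.List.enumerate items1)).items

-- ===== PORT B =====
def create_unique_item_dictionary_alt (items1 : List String) (items2 : List String) : List (String × List String) :=
  let grouped := List.foldl
    (fun (d : PySem.Dict String (List String)) (i : Int) =>
      -- grouped.setdefault(items1[i], []).append(items2[i]); indices in range under Pre_
      (d.setdefault ((PySem.List.pyGet? items1 i).getD "") []).modify
        ((PySem.List.pyGet? items1 i).getD "") [] (fun l => l ++ [(PySem.List.pyGet? items2 i).getD ""]))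
    PySem.Dict.empty (PySem.List.pyRange 0 (items1.length : Int) 1)
  -- {key: list(dict.fromkeys(values)) for key, values in grouped.items()}
  (PySem.Dict.ofList (grouped.items.map (fun p => (p.1, PySem.List.dedup p.2)))).items

-- ===== PRECONDITION & SPEC =====
-- Pre_ excludes exactly the inputs where items1 is longer than items2: there A (and B) raise IndexError.
def Pre_create_unique_item_dictionary (items1 : List String) (items2 : List String) : Prop :=
  items1.length ≤ items2.length
instance (items1 : List String) (items2 : List String) : Decidable (Pre_create_unique_item_dictionary items1 items2) := by unfold Pre_create_unique_item_dictionary; infer_instance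
def pvWitness_create_unique_item_dictionary : List String × List String := (["a", "b", "a", "a"], ["x", "y", "x", "z"])
def Spec_create_unique_item_dictionary (items1 : List String) (items2 : List String) (out : List (String × List String)) : Prop := out = create_unique_item_dictionary_alt items1 items2
instance (items1 : List String) (items2 : List String) (out : List (String × List String)) : Decidable (Spec_create_unique_item_dictionary items1 items2 out) := by unfold Spec_create_unique_item_dictionary; infer_instance

-- ===== CLAIM (what is proved, stated in full; the proofs are below) =====
def Claim_equal_create_unique_item_dictionary : Prop := ∀ (items1 : List String) (items2 : List String), Dom_create_unique_item_dictionary items1 items2 → Pre_create_unique_item_dictionary items1 items2 → Spec_create_unique_item_dictionary items1 items2 (create_unique_item_dictionary items1 items2)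

-- ===== LEMMAS AND PROOFS =====

def pvStepA (d : PySem.Dict String (List String)) (p : String × String) : PySem.Dict String (List String) :=
  if d.contains p.1 = false then d.insert p.1 [p.2]
  else if p.2 ∈ d.getD p.1 [] then d
  else d.modify p.1 [] (fun l => l ++ [p.2])
def pvStepB (d : PySem.Dict String (List String)) (p : String × String) : PySem.Dict String (List String) :=
  (d.setdefault p.1 []).modify p.1 [] (fun l => l ++ [p.2])
def pvMval (l : List (String × List String)) : List (String × List String) :=
  l.map (fun p => (p.1, PySem.List.dedup p.2))

lemma pvContains_mval (d : PySem.Dict String (List String)) (k : String) :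
    (PySem.Dict.mk (pvMval d.items)).contains k = d.contains k := by
  simp [PySem.Dict.contains, pvMval, List.any_map, Function.comp_def]

lemma pvGet_mval (d : PySem.Dict String (List String)) (k : String) :
    (PySem.Dict.mk (pvMval d.items)).get? k = (d.get? k).map PySem.List.dedup := by
  simp [PySem.Dict.get?, pvMval, List.find?_map, Function.comp_def, PySem.List.dedup]

lemma pvDedup_append_singleton (l : List String) (v : String) :
    PySem.List.dedup (l ++ [v]) = if v ∈ l then PySem.List.dedup l else PySem.List.dedup l ++ [v] := by
  have h2 : PySem.List.dedup (l ++ [v]) = PySem.Set.add (PySem.List.dedup l) v := by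
    simp [PySem.List.dedup, PySem.Set.ofList, List.foldl_append]
  rw [h2, PySem.Set.add]
  by_cases h : v ∈ l <;> simp [h, PySem.Set.contains]

lemma pvStep (d : PySem.Dict String (List String)) (p : String × String) (h : d.keys.Nodup) :
    pvStepA (PySem.Dict.mk (pvMval d.items)) p = PySem.Dict.mk (pvMval ((pvStepB d p).items)) := by
  obtain ⟨k, v⟩ := p
  by_cases hc : d.contains k = true
  · -- key already present
    obtain ⟨l, hl⟩ : ∃ l, d.get? k = some l := by
      rw [PySem.Dict.contains_eq_isSome_get?] at hc
      exact Option.isSome_iff_exists.mp hc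
    have hval : ∀ q ∈ d.items, (q.1 == k) = true → q.2 = l := by
      intro q hq hqk
      have heq : q.1 = k := eq_of_beq hqk
      have h1 : d.get? q.1 = some q.2 := PySem.Dict.get?_of_mem_items d (by simpa using hq) h
      rw [heq, hl] at h1
      exact Option.some_injective _ h1.symm
    have hgB : (d.setdefault k []) = d := PySem.Dict.setdefault_of_contains d [] hc
    have hgetD : d.getD k [] = l := by simp [PySem.Dict.getD, hl]
    have hitemsB : (pvStepB d (k, v)).items
        = d.items.map (fun q => if (q.1 == k) = true then (k, l ++ [v]) else q) := by
      simp only [pvStepB, hgB, PySem.Dict.modify, hgetD]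
      exact PySem.Dict.items_insert_of_contains d _ hc
    have hcA : (PySem.Dict.mk (pvMval d.items)).contains k = true := by rw [pvContains_mval]; exact hc
    have hgetA : (PySem.Dict.mk (pvMval d.items)).getD k [] = PySem.List.dedup l := by
      simp [PySem.Dict.getD, pvGet_mval, hl]
    by_cases hm : v ∈ l
    · have hmA : v ∈ (PySem.Dict.mk (pvMval d.items)).getD k [] := by
        rw [hgetA]; exact (PySem.List.mem_dedup l v).mpr hm
      simp only [pvStepA, hcA, Bool.true_eq_false, if_false, if_pos hmA]
      congr 1
      rw [hitemsB]
      simp only [pvMval, List.map_map]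
      apply List.map_congr_left
      intro q hq
      by_cases hqk : (q.1 == k) = true
      · have h2 := hval q hq hqk
        have h3 : PySem.List.dedup (q.2 ++ [v]) = PySem.List.dedup q.2 := by
          rw [pvDedup_append_singleton]; simp [h2, hm]
        simp [Function.comp, ← h2, eq_of_beq hqk]
        exact h3.symm
      · simp [Function.comp, hqk]
    · have hmA : v ∉ (PySem.Dict.mk (pvMval d.items)).getD k [] := by
        rw [hgetA]; exact fun hx => hm ((PySem.List.mem_dedup l v).mp hx)
      simp only [pvStepA, hcA, Bool.true_eq_false, if_false, if_neg hmA]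
      rw [PySem.Dict.modify, hgetA]
      have : (PySem.Dict.mk (pvMval d.items)).insert k (PySem.List.dedup l ++ [v])
          = PySem.Dict.mk ((pvMval d.items).map (fun q => if (q.1 == k) = true then (k, PySem.List.dedup l ++ [v]) else q)) := by
        have := PySem.Dict.items_insert_of_contains (PySem.Dict.mk (pvMval d.items)) (PySem.List.dedup l ++ [v]) hcA
        exact PySem.Dict.ext this
      rw [this]
      congr 1
      rw [hitemsB]
      simp only [pvMval, List.map_map]
      apply List.map_congr_left
      intro q hq
      by_cases hqk : (q.1 == k) = true
      · have h2 := hval q hq hqk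
        have h3 : PySem.List.dedup (q.2 ++ [v]) = PySem.List.dedup q.2 ++ [v] := by
          rw [pvDedup_append_singleton]; simp [h2, hm]
        simp [Function.comp, hqk, ← h2]
        exact h3.symm
      · simp [Function.comp, hqk]
  · -- fresh key
    have hc' : d.contains k = false := by simpa using hc
    have hfind : List.find? (fun q => q.1 == k) d.items = none := by
      rw [← PySem.Dict.get?_eq_none_iff_contains] at hc'
      simpa [PySem.Dict.get?] using hc'
    have hall : ∀ q ∈ d.items, (q.1 == k) = false := by
      intro q hq
      have := List.find?_eq_none.mp hfind q hq
      simpa using this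
    have hcA : (PySem.Dict.mk (pvMval d.items)).contains k = false := by rw [pvContains_mval]; exact hc'
    -- B side: setdefault appends (k, []), then modify turns it into (k, [v])
    have hsd : d.setdefault k [] = d.insert k [] := PySem.Dict.setdefault_of_not_contains d [] hc'
    have hitems1 : (d.insert k ([] : List String)).items = d.items ++ [(k, [])] :=
      PySem.Dict.items_insert_of_not_contains d [] hc'
    have hcd' : (d.insert k ([] : List String)).contains k = true := by
      simp [PySem.Dict.contains, hitems1]
    have hget' : (d.insert k ([] : List String)).getD k [] = [] := by
      simp [PySem.Dict.getD, PySem.Dict.get?, hitems1, List.find?_append, hfind]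
    have hitemsB : (pvStepB d (k, v)).items = d.items ++ [(k, [v])] := by
      simp only [pvStepB, hsd, PySem.Dict.modify, hget']
      rw [PySem.Dict.items_insert_of_contains _ _ hcd', hitems1]
      rw [List.map_append]
      congr 1
      · have hid : ∀ q ∈ d.items, (fun p => if (p.1 == k) = true then (k, ([] : List String) ++ [v]) else p) q = id q := by
          intro q hq; simp [hall q hq]
        rw [List.map_congr_left hid, List.map_id]
      · simp
    simp only [pvStepA, hcA]
    have : (PySem.Dict.mk (pvMval d.items)).insert k [v]
        = PySem.Dict.mk (pvMval d.items ++ [(k, [v])]) := by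
      exact PySem.Dict.ext (PySem.Dict.items_insert_of_not_contains _ [v] hcA)
    rw [this, hitemsB]
    simp [pvMval, PySem.List.dedup, PySem.Set.ofList, PySem.Set.add, PySem.Set.contains]

lemma pvNodupB (d : PySem.Dict String (List String)) (p : String × String) (h : d.keys.Nodup) :
    (pvStepB d p).keys.Nodup := by
  have hsd : (d.setdefault p.1 []).keys.Nodup := by
    by_cases hc : d.contains p.1 = true
    · rw [PySem.Dict.setdefault_of_contains d [] hc]; exact h
    · rw [PySem.Dict.setdefault_of_not_contains d [] (by simpa using hc)]
      exact PySem.Dict.nodup_keys_insert d p.1 [] h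
  simp only [pvStepB, PySem.Dict.modify]
  exact PySem.Dict.nodup_keys_insert _ _ _ hsd

lemma pvNodupFold : ∀ (ps : List (String × String)) (d : PySem.Dict String (List String)),
    d.keys.Nodup → (List.foldl pvStepB d ps).keys.Nodup := by
  intro ps
  induction ps with
  | nil => intro d h; simpa
  | cons p ps ih => intro d h; simpa using ih _ (pvNodupB d p h)

lemma pvMain : ∀ (ps : List (String × String)) (d : PySem.Dict String (List String)), d.keys.Nodup →
    List.foldl pvStepA (PySem.Dict.mk (pvMval d.items)) ps
      = PySem.Dict.mk (pvMval ((List.foldl pvStepB d ps).items)) := by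
  intro ps
  induction ps with
  | nil => intro d h; simp
  | cons p ps ih =>
    intro d h
    simp only [List.foldl_cons]
    rw [pvStep d p h]
    exact ih _ (pvNodupB d p h)

lemma pvOfListItems (g : PySem.Dict String (List String)) (h : g.keys.Nodup) :
    (PySem.Dict.ofList (g.items.map (fun p => (p.1, PySem.List.dedup p.2)))).items
      = pvMval g.items := by
  have hfresh := PySem.Dict.items_foldl_insert_fresh
      (g.items.map (fun p => (p.1, PySem.List.dedup p.2))) Prod.fst Prod.snd PySem.Dict.empty
      (by intro a _; simp [PySem.Dict.contains, PySem.Dict.empty])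
      (by
        have : (g.items.map (fun p => (p.1, PySem.List.dedup p.2))).map Prod.fst = g.keys := by
          simp [List.map_map, Function.comp_def, PySem.Dict.keys]
        rw [this]; exact h)
  simpa [PySem.Dict.ofList, PySem.Dict.update, PySem.Dict.empty, pvMval] using hfresh

lemma pvFoldA (items2 : List String) :
    ∀ (xs : List String) (s : Nat) (d : PySem.Dict String (List String)),
      s + xs.length ≤ items2.length →
      List.foldl
        (fun (d : PySem.Dict String (List String)) (p : Int × String) =>
          let second := (PySem.List.pyGet? items2 p.1).getD ""
          if d.contains p.2 = false then d.insert p.2 [second]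
          else if second ∈ d.getD p.2 [] then d
          else d.modify p.2 [] (fun l => l ++ [second]))
        d (PySem.List.enumerate xs (s : Int))
      = List.foldl pvStepA d (xs.zip (items2.drop s)) := by
  intro xs
  induction xs with
  | nil => intro s d h; simp [PySem.List.enumerate_nil]
  | cons x xs ih =>
    intro s d h
    have hs : s < items2.length := by simp at h; omega
    have hdrop : items2.drop s = items2[s] :: items2.drop (s + 1) := (List.getElem_cons_drop hs).symm
    rw [PySem.List.enumerate_cons, hdrop]
    simp only [List.foldl_cons, List.zip_cons_cons]
    have hget : PySem.List.pyGet? items2 (s : Int) = some items2[s] := by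
      simp [PySem.List.pyGet?, PySem.List.pyIdx?, hs]
    have hcast : ((s : Int) + 1) = ((s + 1 : Nat) : Int) := by push_cast; ring
    rw [hcast, ih (s+1) _ (by simp at h ⊢; omega)]
    congr 1
    simp [pvStepA, hget]

lemma pvFoldB (items1 items2 : List String) :
    ∀ (k s : Nat) (d : PySem.Dict String (List String)),
      s + k = items1.length → items1.length ≤ items2.length →
      List.foldl
        (fun (d : PySem.Dict String (List String)) (i : Int) =>
          (d.setdefault ((PySem.List.pyGet? items1 i).getD "") []).modify
            ((PySem.List.pyGet? items1 i).getD "") [] (fun l => l ++ [(PySem.List.pyGet? items2 i).getD ""]))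
        d (PySem.List.pyRange (s : Int) (items1.length : Int) 1)
      = List.foldl pvStepB d ((items1.drop s).zip (items2.drop s)) := by
  intro k
  induction k with
  | zero =>
    intro s d h _
    have hemp : PySem.List.pyRange (s : Int) (items1.length : Int) 1 = [] := by
      simp [PySem.List.pyRange]; omega
    rw [hemp]
    simp [List.drop_of_length_le (by omega : items1.length ≤ s)]
  | succ k ih =>
    intro s d h hlen
    have hs1 : s < items1.length := by omega
    have hs2 : s < items2.length := by omega
    rw [PySem.List.pyRange_one_cons (by exact_mod_cast hs1)]
    rw [(List.getElem_cons_drop hs1).symm, (List.getElem_cons_drop hs2).symm]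
    simp only [List.foldl_cons, List.zip_cons_cons]
    have hg1 : PySem.List.pyGet? items1 (s : Int) = some items1[s] := by
      simp [PySem.List.pyGet?, PySem.List.pyIdx?, hs1]
    have hg2 : PySem.List.pyGet? items2 (s : Int) = some items2[s] := by
      simp [PySem.List.pyGet?, PySem.List.pyIdx?, hs2]
    have hcast : ((s : Int) + 1) = ((s + 1 : Nat) : Int) := by push_cast; ring
    rw [hcast, ih (s+1) _ (by omega) hlen]
    congr 1
    simp [pvStepB, hg1, hg2]

-- ===== VERDICT (by name: the statement is the Claim_ definition above) =====
theorem create_unique_item_dictionary_spec : Claim_equal_create_unique_item_dictionary := by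
  intro items1 items2 _ hpre
  unfold Spec_create_unique_item_dictionary
  unfold Pre_create_unique_item_dictionary at hpre
  unfold create_unique_item_dictionary create_unique_item_dictionary_alt
  have hA := pvFoldA items2 items1 0 PySem.Dict.empty (by simpa using hpre)
  have hB := pvFoldB items1 items2 items1.length 0 PySem.Dict.empty (by omega) hpre
  simp only [Nat.cast_zero, List.drop_zero] at hA hB
  have hnodupE : (PySem.Dict.empty : PySem.Dict String (List String)).keys.Nodup := by
    simp [PySem.Dict.empty, PySem.Dict.keys]
  have hmain := pvMain (items1.zip items2) PySem.Dict.empty hnodupE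
  have hemp : (PySem.Dict.mk (pvMval (PySem.Dict.empty : PySem.Dict String (List String)).items))
      = (PySem.Dict.empty : PySem.Dict String (List String)) := by
    simp [PySem.Dict.empty, pvMval]
  rw [hemp] at hmain
  rw [hA, hmain, hB]
  rw [pvOfListItems _ (pvNodupFold (items1.zip items2) PySem.Dict.empty hnodupE)]
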